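-- pv_equiv track=rewrite | github.com/Melika-Ayoughi/Full-Scale-Gambler-for-Object-Detection | detectron2/data/datasets/surface_signs.py | get_label_id
-- ===== SOURCE A (Python) =====
-- from typing import Dict, List, Tuple
--
-- def get_label_id(
--     lookup_table: Dict[str, int], label_name: str, default_value=-1
-- ) -> int:
--     if label_name == "":
--         return default_value
--     if label_name in lookup_table:
--         return lookup_table[label_name]
--     else:
--         parent_label_name = "/".join(label_name.split("/")[:-1])
--         return get_label_id(lookup_table, parent_label_name)
-- ===== SOURCE B (Python) =====
-- def get_label_id(lookup_table, label_name, default_value=-1):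
--     if label_name == "":
--         return default_value
--     parts = label_name.split("/")
--     for i in range(len(parts), 0, -1):
--         candidate = "/".join(parts[:i])
--         if candidate == "":
--             break
--         if candidate in lookup_table:
--             return lookup_table[candidate]
--     return -1
-- ===== Notes on version B (the rewrite author's own statement) =====
-- stated objective: alternative
-- what changed: A re-splits and re-joins the shrinking name on every self-recursive step; B splits the path once and iterates over its '/'-joined prefixes from longest to shortest, looking each up until one matches (returning -1 after the loop, matching A's non-forwarded default).
import Mathlib
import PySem

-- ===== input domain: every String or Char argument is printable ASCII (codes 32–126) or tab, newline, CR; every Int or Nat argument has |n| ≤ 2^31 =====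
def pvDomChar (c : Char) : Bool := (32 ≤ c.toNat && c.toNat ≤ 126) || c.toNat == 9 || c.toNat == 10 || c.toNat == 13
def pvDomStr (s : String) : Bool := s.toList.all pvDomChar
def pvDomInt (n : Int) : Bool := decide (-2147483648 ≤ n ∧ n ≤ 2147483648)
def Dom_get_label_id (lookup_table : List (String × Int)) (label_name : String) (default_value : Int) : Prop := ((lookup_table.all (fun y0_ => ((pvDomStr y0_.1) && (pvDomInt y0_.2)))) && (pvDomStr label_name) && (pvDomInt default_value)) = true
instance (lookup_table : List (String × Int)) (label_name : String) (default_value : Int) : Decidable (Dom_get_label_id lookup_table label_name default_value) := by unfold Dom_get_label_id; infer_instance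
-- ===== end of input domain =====

-- B replaces A's re-split/re-join self-recursion by splitting the path ONCE and scanning its
-- "/"-joined prefixes from longest to shortest (objective: alternative decomposition; not timed faster).

-- first-match lookup in the association list = Python dict membership/indexing (shared by both ports)
def pvLookup (t : List (String × Int)) (k : String) : Option Int :=
  (t.find? (fun p => p.1 == k)).map (·.2)

-- exact port of s.split("/") (PySem.Str.split? with the non-empty separator "/", unwrapped)
def pvSplit (s : String) : List String :=
  (PySem.Chars.splitOn s.toList ['/']).map String.ofList

-- ---- lemmas the port of A needs for termination (cited by its decreasing_by) ----

theorem pv_go_eq (fuel : Nat) : ∀ (l cur : List Char) (acc : List (List Char)), l.length ≤ fuel →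
    PySem.Chars.splitOn.go ['/'] fuel l cur acc
      = acc.reverse ++ List.modifyHead (fun h => cur.reverse ++ h) (List.splitOnP (fun c => c == '/') l) := by
  induction fuel with
  | zero =>
    intro l cur acc h
    have hl : l = [] := List.eq_nil_of_length_eq_zero (Nat.le_zero.mp h)
    subst hl
    simp [PySem.Chars.splitOn.go, List.splitOnP_nil]
  | succ n ih =>
    intro l cur acc h
    cases l with
    | nil => simp [PySem.Chars.splitOn.go, List.splitOnP_nil]
    | cons c rest =>
      rw [List.splitOnP_cons]
      by_cases hc : c = '/'
      · subst hc
        have hpre : List.isPrefixOf ['/'] ('/' :: rest) = true := by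
          simp [List.isPrefixOf]
        simp only [PySem.Chars.splitOn.go, hpre, if_pos]
        rw [ih _ _ _ (by simpa using Nat.le_of_succ_le_succ h)]
        rcases hsp : List.splitOnP (fun c => c == '/') rest with _ | ⟨h0, t0⟩
        · exact absurd hsp (List.splitOnP_ne_nil _ rest)
        · simp [hsp]
      · have hpre : List.isPrefixOf ['/'] (c :: rest) = false := by
          simp [List.isPrefixOf]
          exact fun hh => absurd hh.symm hc
        simp only [PySem.Chars.splitOn.go, hpre, Bool.false_eq_true, if_false]
        rw [ih _ _ _ (by simpa using Nat.le_of_succ_le_succ h)]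
        rcases hsp : List.splitOnP (fun c => c == '/') rest with _ | ⟨h0, t0⟩
        · exact absurd hsp (List.splitOnP_ne_nil _ rest)
        · simp [hc]

theorem pv_splitOn_eq (cs : List Char) :
    PySem.Chars.splitOn cs ['/'] = List.splitOn '/' cs := by
  unfold PySem.Chars.splitOn
  rw [pv_go_eq _ _ _ _ (Nat.le_succ_of_le (Nat.le_refl _))]
  rcases hsp : List.splitOnP (fun c => c == '/') cs with _ | ⟨h0, t0⟩
  · exact absurd hsp (List.splitOnP_ne_nil _ cs)
  · rw [List.splitOn, hsp]
    simp

theorem pv_join_splitOn (cs : List Char) :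
    PySem.Chars.join ['/'] (PySem.Chars.splitOn cs ['/']) = cs := by
  rw [pv_splitOn_eq]
  simpa [PySem.Chars.join] using List.intercalate_splitOn cs '/'

theorem pv_splitOn_ne_nil (cs : List Char) : PySem.Chars.splitOn cs ['/'] ≠ [] := by
  rw [pv_splitOn_eq]; exact List.splitOnP_ne_nil _ cs

theorem pv_len_join (ps : List (List Char)) :
    (PySem.Chars.join ['/'] ps).length = (ps.map List.length).sum + (ps.length - 1) := by
  induction ps with
  | nil => simp [PySem.Chars.join_nil]
  | cons a tl ih =>
    cases tl with
    | nil => simp [PySem.Chars.join_singleton]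
    | cons b tl' =>
      rw [PySem.Chars.join_cons_cons, List.length_append, List.length_append, ih]
      simp only [List.map_cons, List.sum_cons, List.length_cons, List.length_nil]
      omega

theorem pv_sum_dropLast (ps : List (List Char)) :
    (ps.dropLast.map List.length).sum ≤ (ps.map List.length).sum := by
  induction ps using List.reverseRecOn with
  | nil => simp
  | append_singleton qs l _ => simp

theorem pv_slice_neg_one (xs : List String) :
    PySem.List.slice xs none (some (-1)) = xs.dropLast := by
  rcases xs with _ | ⟨y, ys⟩
  · rfl
  · simp [PySem.List.slice, PySem.List.clampIdx, List.dropLast_eq_take]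
    split_ifs <;> omega

-- the parent path is strictly shorter than a non-empty path (termination of the port of A)
theorem pv_parent_lt (s : String) (h : ¬ s = "") :
    (PySem.Str.join "/" (PySem.List.slice (pvSplit s) none (some (-1)))).toList.length
      < s.toList.length := by
  rw [pv_slice_neg_one]
  have hcs : s.toList ≠ [] := by
    intro hnil
    exact h (by rw [← String.ofList_toList (s := s), hnil])
  set ps := PySem.Chars.splitOn s.toList ['/'] with hps
  have hjoin : PySem.Chars.join ['/'] ps = s.toList := pv_join_splitOn s.toList
  have hne : ps ≠ [] := pv_splitOn_ne_nil s.toList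
  have hmap : (pvSplit s).dropLast.map String.toList = ps.dropLast := by
    rw [pvSplit, ← hps, ← List.map_dropLast, List.map_map]
    simp [Function.comp_def]
  have hlen : (PySem.Str.join "/" ((pvSplit s).dropLast)).toList
      = PySem.Chars.join ['/'] ps.dropLast := by
    rw [PySem.Str.join, String.toList_ofList, hmap]
    rw [show ("/" : String).toList = ['/'] from rfl]
  rw [hlen]
  have h1 := pv_len_join ps
  have h2 := pv_len_join ps.dropLast
  have h3 := pv_sum_dropLast ps
  have hlen1 : 0 < ps.length := List.length_pos_of_ne_nil hne
  rcases Nat.lt_or_ge ps.length 2 with hk | hk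
  · -- one single segment: the parent is empty, the path is not
    have hone : ps.length = 1 := by omega
    have hd : ps.dropLast = [] := by
      simp [List.dropLast_eq_take, hone]
    rw [hd, PySem.Chars.join_nil]
    simpa using List.length_pos_of_ne_nil hcs
  · have hd : ps.dropLast.length = ps.length - 1 := List.length_dropLast
    rw [← hjoin, h1, h2, hd]
    omega

-- ===== PORT A =====
def get_label_id (lookup_table : List (String × Int)) (label_name : String) (default_value : Int) : Int :=
  if label_name = "" then default_value
  else
    match pvLookup lookup_table label_name with
    | some v => v
    | none =>
      -- parent_label_name = "/".join(label_name.split("/")[:-1]); recursive call uses the default -1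
      let parent_label_name :=
        PySem.Str.join "/" (PySem.List.slice (pvSplit label_name) none (some (-1)))
      get_label_id lookup_table parent_label_name (-1)
termination_by label_name.toList.length
decreasing_by exact pv_parent_lt label_name (by assumption)

-- ===== PORT B =====
-- for i in range(len(parts), 0, -1): candidate = "/".join(parts[:i]); break on ""; else look up
def pvScan (t : List (String × Int)) (parts : List String) : Nat → Int
  | 0 => -1
  | i + 1 =>
    let candidate := PySem.Str.join "/" (parts.take (i + 1))  -- parts[:i] for 0 ≤ i ≤ len(parts) is List.take
    if candidate = "" then -1
    else
      match pvLookup t candidate with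
      | some v => v
      | none => pvScan t parts i

def get_label_id_alt (lookup_table : List (String × Int)) (label_name : String) (default_value : Int) : Int :=
  if label_name = "" then default_value
  else
    let parts := pvSplit label_name
    pvScan lookup_table parts parts.length

-- ===== PRECONDITION & SPEC =====
def Spec_get_label_id (lookup_table : List (String × Int)) (label_name : String) (default_value : Int) (out : Int) : Prop := out = get_label_id_alt lookup_table label_name default_value
instance (lookup_table : List (String × Int)) (label_name : String) (default_value : Int) (out : Int) : Decidable (Spec_get_label_id lookup_table label_name default_value out) := by unfold Spec_get_label_id; infer_instance

-- ===== CLAIM (what is proved, stated in full; the proofs are below) =====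
def Claim_equal_get_label_id : Prop := ∀ (lookup_table : List (String × Int)) (label_name : String) (default_value : Int), Dom_get_label_id lookup_table label_name default_value → Spec_get_label_id lookup_table label_name default_value (get_label_id lookup_table label_name default_value)

-- ===== LEMMAS AND PROOFS =====

-- the segments produced by splitting on '/' contain no '/'
theorem pv_splitOnP_free {α : Type} (P : α → Bool) (xs : List α) :
    ∀ p ∈ xs.splitOnP P, ∀ c ∈ p, ¬ P c := by
  induction xs with
  | nil =>
    intro p hp c hc
    simp [List.splitOnP_nil] at hp
    subst hp; simp at hc
  | cons x xs ih =>
    intro p hp c hc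
    rw [List.splitOnP_cons] at hp
    by_cases hx : P x
    · rw [if_pos hx] at hp
      rcases List.mem_cons.mp hp with hp | hp
      · subst hp; simp at hc
      · exact ih p hp c hc
    · rw [if_neg hx] at hp
      rcases hhd : xs.splitOnP P with _ | ⟨h0, t0⟩
      · exact absurd hhd (List.splitOnP_ne_nil P xs)
      · rw [hhd] at hp
        simp only [List.modifyHead] at hp
        rcases List.mem_cons.mp hp with hp | hp
        · subst hp
          rcases List.mem_cons.mp hc with hc | hc
          · exact hc ▸ hx
          · exact ih h0 (by rw [hhd]; exact List.mem_cons_self) c hc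
        · exact ih p (by rw [hhd]; exact List.mem_cons_of_mem _ hp) c hc

theorem pv_splitOn_free (cs : List Char) :
    ∀ p ∈ PySem.Chars.splitOn cs ['/'], '/' ∉ p := by
  rw [pv_splitOn_eq]
  intro p hp hmem
  have hfree := pv_splitOnP_free (fun c => c == '/') cs p (by rw [List.splitOn] at hp; exact hp) '/' hmem
  simp at hfree

theorem pv_splitOn_join (ps : List (List Char)) (hne : ps ≠ []) (hfree : ∀ p ∈ ps, '/' ∉ p) :
    PySem.Chars.splitOn (PySem.Chars.join ['/'] ps) ['/'] = ps := by
  rw [pv_splitOn_eq]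
  exact List.splitOn_intercalate ps '/' hfree hne

-- pvScan only looks at the first i elements of parts
theorem pv_scan_take (t : List (String × Int)) :
    ∀ (i : Nat) (ps qs : List String), ps.take i = qs.take i → pvScan t ps i = pvScan t qs i := by
  intro i
  induction i with
  | zero => intro ps qs _; rfl
  | succ n ih =>
    intro ps qs h
    have hn : ps.take n = qs.take n := by
      have h2 := congrArg (List.take n) h
      rwa [List.take_take, List.take_take, Nat.min_eq_left (Nat.le_succ n)] at h2
    simp only [pvScan, h]
    rcases hm : pvLookup t (PySem.Str.join "/" (qs.take (n + 1))) with _ | v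
    · simp [ih ps qs hn]
    · simp [hm]

theorem pv_string_ne (cs : List Char) (h : cs ≠ []) : String.ofList cs ≠ "" := by
  intro hh
  exact h (by simpa using congrArg String.toList hh)

-- the joined take of all elements is the whole string
theorem pv_join_take_all (ps : List (List Char)) :
    PySem.Str.join "/" ((ps.map String.ofList).take ps.length)
      = String.ofList (PySem.Chars.join ['/'] ps) := by
  rw [show (ps.map String.ofList).take ps.length = ps.map String.ofList by
        simp]
  rw [PySem.Str.join, List.map_map]
  simp [Function.comp_def]

-- one unfolding of A's port on a non-empty name: the default is irrelevant
theorem pv_A_unfold (t : List (String × Int)) (s : String) (d : Int) (h : ¬ s = "") :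
    get_label_id t s d =
      match pvLookup t s with
      | some v => v
      | none =>
        get_label_id t (PySem.Str.join "/" (PySem.List.slice (pvSplit s) none (some (-1)))) (-1) := by
  rw [get_label_id]
  simp [h]

theorem pv_take_dropLast (ps : List String) (k : Nat) (h : k + 1 ≤ ps.length) :
    ps.dropLast.take k = ps.take k := by
  rw [List.dropLast_eq_take, List.take_take]
  congr 1
  omega

-- main invariant: on a non-empty-or-not joined segment list, A's walk equals B's prefix scan
theorem pv_key (t : List (String × Int)) :
    ∀ (n : Nat) (ps : List (List Char)), ps.length ≤ n → ps ≠ [] → (∀ p ∈ ps, '/' ∉ p) →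
      get_label_id t (String.ofList (PySem.Chars.join ['/'] ps)) (-1)
        = pvScan t (ps.map String.ofList) ps.length := by
  intro n
  induction n with
  | zero =>
    intro ps hlen hne _
    exact absurd (List.eq_nil_of_length_eq_zero (Nat.le_zero.mp hlen)) hne
  | succ n ih =>
    intro ps hlen hne hfree
    rcases hk : ps.length with _ | k
    · exact absurd (List.eq_nil_of_length_eq_zero hk) hne
    have hcand : PySem.Str.join "/" ((ps.map String.ofList).take (k + 1))
        = String.ofList (PySem.Chars.join ['/'] ps) := by
      rw [← hk]; exact pv_join_take_all ps
    by_cases hcs : PySem.Chars.join ['/'] ps = []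
    · -- the joined name is empty (ps = [[]]): A returns -1 at once, B breaks out
      rw [hcs]
      rw [show (String.ofList [] : String) = "" from rfl]
      rw [get_label_id]
      simp only [pvScan]
      rw [hcand, hcs]
      simp
    · have hs : ¬ String.ofList (PySem.Chars.join ['/'] ps) = "" := pv_string_ne _ hcs
      rw [pv_A_unfold t _ _ hs]
      simp only [pvScan]
      simp only [hcand, if_neg hs]
      rcases hm : pvLookup t (String.ofList (PySem.Chars.join ['/'] ps)) with _ | v
      · -- not found: A recurses on the parent, B steps to the next-shorter prefix
        simp only
        have hsplit : pvSplit (String.ofList (PySem.Chars.join ['/'] ps)) = ps.map String.ofList := by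
          rw [pvSplit, String.toList_ofList, pv_splitOn_join ps hne hfree]
        rw [hsplit, pv_slice_neg_one, ← List.map_dropLast]
        have hparent : PySem.Str.join "/" (ps.dropLast.map String.ofList)
            = String.ofList (PySem.Chars.join ['/'] ps.dropLast) := by
          rw [PySem.Str.join, List.map_map]
          simp [Function.comp_def]
        rw [hparent]
        rcases hdl : ps.dropLast with _ | ⟨q, qs⟩
        · -- single segment: the parent is "", A returns -1, B's scan hits 0
          have hk0 : k = 0 := by
            have hlp : ps.dropLast.length = ps.length - 1 := List.length_dropLast
            rw [hdl] at hlp; simp at hlp; omega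
          rw [PySem.Chars.join_nil]
          rw [show (String.ofList [] : String) = "" from rfl]
          rw [get_label_id]
          simp [hk0, pvScan]
        · -- at least two segments: induction hypothesis on the dropped-last list
          have hne' : ps.dropLast ≠ [] := by rw [hdl]; simp
          have hfree' : ∀ p ∈ ps.dropLast, '/' ∉ p := fun p hp =>
            hfree p (List.dropLast_sublist ps |>.subset hp)
          have hlen' : ps.dropLast.length ≤ n := by
            have : ps.dropLast.length = ps.length - 1 := List.length_dropLast; omega
          rw [← hdl] at *
          rw [ih ps.dropLast hlen' hne' hfree']
          have hdlk : ps.dropLast.length = k := by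
            have : ps.dropLast.length = ps.length - 1 := List.length_dropLast; omega
          rw [hdlk]
          apply pv_scan_take
          rw [List.map_dropLast]
          exact pv_take_dropLast (ps.map String.ofList) k (by simp [hk])
      · simp

-- ===== VERDICT (by name: the statement is the Claim_ definition above) =====
theorem get_label_id_spec : Claim_equal_get_label_id := by
  intro t s d _
  unfold Spec_get_label_id get_label_id_alt
  by_cases hs : s = ""
  · rw [if_pos hs, get_label_id]
    simp [hs]
  · rw [if_neg hs]
    simp only
    set ps := PySem.Chars.splitOn s.toList ['/'] with hps
    have hne : ps ≠ [] := pv_splitOn_ne_nil s.toList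
    have hfree : ∀ p ∈ ps, '/' ∉ p := pv_splitOn_free s.toList
    have hjoin : String.ofList (PySem.Chars.join ['/'] ps) = s := by
      rw [pv_join_splitOn, String.ofList_toList]
    have hlen : (pvSplit s).length = ps.length := by simp [pvSplit, ← hps]
    have hkey := pv_key t ps.length ps (le_refl _) hne hfree
    rw [hjoin] at hkey
    rw [show pvSplit s = ps.map String.ofList from by rw [pvSplit, ← hps]]
    rw [show (ps.map String.ofList).length = ps.length by simp]
    rw [← hkey]
    rw [pv_A_unfold t s d hs, pv_A_unfold t s (-1) hs]
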